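-- pv_equiv track=rewrite | github.com/varshinivij/PantheonOS | pantheon/claw/bridge.py | _resolve_agent_token
-- ===== SOURCE A (Python) =====
-- from typing import Any
--
-- def _resolve_agent_token(agents: list[dict[str, Any]], token: str) -> str | None:
--     token = str(token or "").strip()
--     if not token:
--         return None
--     if token.isdigit():
--         idx = int(token)
--         if 1 <= idx <= len(agents):
--             return str(agents[idx - 1].get("name") or "")
--
--     lower = token.lower()
--     for agent in agents:
--         name = str(agent.get("name") or "")
--         if name.lower() == lower:
--             return name
--     for agent in agents:
--         name = str(agent.get("name") or "")
--         if name.lower().startswith(lower):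
--             return name
--     return None
-- ===== SOURCE B (Python) =====
-- def _resolve_agent_token(agents, token):
--     token = str(token or "").strip()
--     if not token:
--         return None
--     if token.isdigit():
--         idx = int(token)
--         if 1 <= idx <= len(agents):
--             return str(agents[idx - 1].get("name") or "")
--     lower = token.lower()
--     scored = []
--     for i, agent in enumerate(agents):
--         name = str(agent.get("name") or "")
--         nl = name.lower()
--         if nl == lower:
--             scored.append((0, i, name))
--         elif nl.startswith(lower):
--             scored.append((1, i, name))
--     if scored:
--         return min(scored)[2]
--     return None
-- ===== Notes on version B (the rewrite author's own statement) =====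
-- stated objective: alternative
-- what changed: A scans the agent list twice (a full pass for exact matches, then a second pass for prefix matches); B instead builds a list of scored candidates (rank 0 = exact, rank 1 = prefix, paired with the agent index) in one pass and returns the name of the lexicographically minimal (rank, index) candidate, which coincides with A's exact-before-prefix, first-hit tie-break.
import Mathlib
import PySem

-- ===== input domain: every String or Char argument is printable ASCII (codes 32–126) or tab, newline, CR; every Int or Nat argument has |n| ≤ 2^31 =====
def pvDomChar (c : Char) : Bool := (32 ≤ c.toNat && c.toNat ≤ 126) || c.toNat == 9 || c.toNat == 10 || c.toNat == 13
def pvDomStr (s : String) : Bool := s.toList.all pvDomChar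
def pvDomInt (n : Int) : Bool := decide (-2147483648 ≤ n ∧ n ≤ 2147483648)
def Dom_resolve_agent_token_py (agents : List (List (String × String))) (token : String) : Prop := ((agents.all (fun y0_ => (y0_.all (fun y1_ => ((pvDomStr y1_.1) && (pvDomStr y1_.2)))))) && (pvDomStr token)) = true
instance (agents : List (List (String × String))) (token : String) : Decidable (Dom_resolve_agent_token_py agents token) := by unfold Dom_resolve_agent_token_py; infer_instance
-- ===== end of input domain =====

-- B replaces A's two scans (exact pass, then prefix pass) by one pass that scores every
-- matching agent as (rank, index, name) — rank 0 exact, rank 1 prefix — and takes the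
-- lexicographic minimum; equal return value proved on all inputs.

-- ===== PORT A =====
-- agent.get("name") or "": first value stored under "name", "" if missing (or itself "")
def pvGetName (agent : List (String × String)) : String :=
  ((agent.find? (fun p => p.1 == "name")).map (·.2)).getD ""

-- first loop of A: exact (case-insensitive) name match
def pvFindExact (agents : List (List (String × String))) (lower : String) : Option String :=
  match agents with
  | [] => none
  | a :: rest =>
    let name := pvGetName a
    if PySem.Str.lower name = lower then some name else pvFindExact rest lower

-- second loop of A: prefix match
def pvFindPrefix (agents : List (List (String × String))) (lower : String) : Option String :=
  match agents with
  | [] => none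
  | a :: rest =>
    let name := pvGetName a
    if PySem.Str.startswith (PySem.Str.lower name) lower then some name
    else pvFindPrefix rest lower

def resolve_agent_token_py (agents : List (List (String × String))) (token : String) : Option String :=
  let token := PySem.Str.strip token          -- str(token or "").strip()
  if token = "" then none
  else
    -- digit-index branch; token.isdigit() guarantees int(token) parses, so getD 0 / getD [] are unreachable defaults
    let rest : Option String :=
      let lower := PySem.Str.lower token
      match pvFindExact agents lower with
      | some n => some n
      | none => pvFindPrefix agents lower
    if PySem.Str.strIsdigit token then
      let idx := (PySem.Int.ofStr? token).getD 0
      if 1 ≤ idx ∧ idx ≤ agents.length then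
        some (pvGetName ((PySem.List.pyGet? agents (idx - 1)).getD []))
      else rest
    else rest

-- ===== PORT B =====
-- B's scoring pass (the enumerate loop): rank 0 = exact match, rank 1 = prefix match
def pvScore (agents : List (List (String × String))) (lower : String) (i : Nat) :
    List (Nat × Nat × String) :=
  match agents with
  | [] => []
  | a :: rest =>
    let name := pvGetName a
    let nl := PySem.Str.lower name
    if nl = lower then (0, i, name) :: pvScore rest lower (i + 1)
    else if PySem.Str.startswith nl lower then (1, i, name) :: pvScore rest lower (i + 1)
    else pvScore rest lower (i + 1)

-- Python tuple '<' on the scored triples; the name component is never reached since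
-- the index components are pairwise distinct by construction
def pvLtT (x y : Nat × Nat × String) : Bool :=
  x.1 < y.1 || (x.1 == y.1 && x.2.1 < y.2.1)

-- min(scored): first minimal element (replace only on strictly smaller)
def pvMinList (xs : List (Nat × Nat × String)) : Option (Nat × Nat × String) :=
  match xs with
  | [] => none
  | x :: rest =>
    match pvMinList rest with
    | none => some x
    | some m => some (if pvLtT m x then m else x)

def resolve_agent_token_py_alt (agents : List (List (String × String))) (token : String) : Option String :=
  let token := PySem.Str.strip token
  if token = "" then none
  else
    let rest : Option String :=
      match pvMinList (pvScore agents (PySem.Str.lower token) 0) with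
      | some t => some t.2.2
      | none => none
    if PySem.Str.strIsdigit token then
      let idx := (PySem.Int.ofStr? token).getD 0
      if 1 ≤ idx ∧ idx ≤ agents.length then
        some (pvGetName ((PySem.List.pyGet? agents (idx - 1)).getD []))
      else rest
    else rest

-- ===== PRECONDITION & SPEC =====
def Spec_resolve_agent_token_py (agents : List (List (String × String))) (token : String) (out : Option String) : Prop := out = resolve_agent_token_py_alt agents token
instance (agents : List (List (String × String))) (token : String) (out : Option String) : Decidable (Spec_resolve_agent_token_py agents token out) := by unfold Spec_resolve_agent_token_py; infer_instance

-- ===== CLAIM (what is proved, stated in full; the proofs are below) =====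
def Claim_equal_resolve_agent_token_py : Prop := ∀ (agents : List (List (String × String))) (token : String), Dom_resolve_agent_token_py agents token → Spec_resolve_agent_token_py agents token (resolve_agent_token_py agents token)

-- ===== LEMMAS AND PROOFS =====

-- key invariant: the minimum of the scored list is the first exact match (rank 0) if
-- any exists, else the first prefix match (rank 1), else absent; indices start at i
theorem pvMin_score (agents : List (List (String × String))) (lower : String) (i : Nat) :
    match pvFindExact agents lower with
    | some n => ∃ j, i ≤ j ∧ pvMinList (pvScore agents lower i) = some (0, j, n)
    | none =>
      match pvFindPrefix agents lower with
      | some n => ∃ j, i ≤ j ∧ pvMinList (pvScore agents lower i) = some (1, j, n)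
      | none => pvMinList (pvScore agents lower i) = none := by
  induction agents generalizing i with
  | nil => simp [pvFindExact, pvFindPrefix, pvScore, pvMinList]
  | cons a rest ih =>
    have ih' := ih (i + 1)
    by_cases hx : PySem.Str.lower (pvGetName a) = lower
    · -- head is an exact match: it wins against everything in the tail
      simp only [pvFindExact, pvScore, hx]
      refine ⟨i, le_refl i, ?_⟩
      rcases hE : pvFindExact rest lower with _ | n <;> simp only [hE] at ih'
      · rcases hP : pvFindPrefix rest lower with _ | n <;> simp only [hP] at ih'
        · simp [pvMinList, ih']
        · obtain ⟨j, hj, hm⟩ := ih'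
          simp [pvMinList, hm, pvLtT]
      · obtain ⟨j, hj, hm⟩ := ih'
        have : ¬ j < i := by omega
        simp [pvMinList, hm, pvLtT, this]
    · by_cases hp : PySem.Str.startswith (PySem.Str.lower (pvGetName a)) lower
      · -- head is a prefix-only match
        simp only [pvFindExact, pvFindPrefix, pvScore, hx, hp]
        rcases hE : pvFindExact rest lower with _ | n <;> simp only [hE] at ih' ⊢
        · refine ⟨i, le_refl i, ?_⟩
          rcases hP : pvFindPrefix rest lower with _ | n <;> simp only [hP] at ih'
          · simp [pvMinList, ih']
          · obtain ⟨j, hj, hm⟩ := ih'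
            have : ¬ j < i := by omega
            simp [pvMinList, hm, pvLtT, this]
        · obtain ⟨j, hj, hm⟩ := ih'
          exact ⟨j, by omega, by simp [pvMinList, hm, pvLtT]⟩
      · -- head matches nothing: everything passes to the tail
        simp only [pvFindExact, pvFindPrefix, pvScore, hx, hp]
        rcases hE : pvFindExact rest lower with _ | n <;> simp only [hE] at ih' ⊢
        · rcases hP : pvFindPrefix rest lower with _ | n <;> simp only [hP] at ih' ⊢
          · exact ih'
          · obtain ⟨j, hj, hm⟩ := ih'; exact ⟨j, by omega, hm⟩
        · obtain ⟨j, hj, hm⟩ := ih'; exact ⟨j, by omega, hm⟩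

-- name-level corollary: B's min-of-scores equals A's staged scans
theorem pvMin_score_name (agents : List (List (String × String))) (lower : String) :
    (match pvMinList (pvScore agents lower 0) with
      | some t => some t.2.2
      | none => none) =
    (match pvFindExact agents lower with
      | some n => some n
      | none => pvFindPrefix agents lower) := by
  have h := pvMin_score agents lower 0
  rcases hE : pvFindExact agents lower with _ | n <;> simp only [hE] at h ⊢
  · rcases hP : pvFindPrefix agents lower with _ | n <;> simp only [hP] at h ⊢
    · simp [h]
    · obtain ⟨j, _, hm⟩ := h; simp [hm]
  · obtain ⟨j, _, hm⟩ := h; simp [hm]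

-- ===== VERDICT (by name: the statement is the Claim_ definition above) =====
theorem resolve_agent_token_py_spec : Claim_equal_resolve_agent_token_py := by
  intro agents token _
  unfold Spec_resolve_agent_token_py
  simp only [resolve_agent_token_py, resolve_agent_token_py_alt, pvMin_score_name]
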